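-- pv_equiv track=rewrite | github.com/Olly000/RandomNoteGen | RandomNoteV2.py | note_list_gen
-- ===== SOURCE A (Python) =====
-- def note_list_gen(note_key, note_range):  # returns list of note numbers to be output
--     note_list = []
--     for n in note_key:
--         note_list.append(note_range[0] + n)
--     while note_list[-1] < note_range[1]:
--         note_key = [n + 12 for n in note_key]
--         for n in note_key:
--             if note_list[-1] < note_range[1]:
--                 note_list.append(note_range[0] + n)
--     return note_list
-- ===== SOURCE B (Python) =====
-- def note_list_gen(note_key, note_range):  # returns list of note numbers to be output
--     base, top = note_range[0], note_range[1]
--     k = len(note_key)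
--     if base + note_key[-1] >= top:
--         m = k
--     else:
--         # first octave (>=1) at which each key element reaches top: ceil((top-base-n)/12), at least 1
--         octs = [max(1, -((base + n - top) // 12)) for n in note_key]
--         o = min(octs)
--         i = octs.index(o)
--         m = k * o + i + 1
--     return [base + note_key[j % k] + 12 * (j // k) for j in range(m)]
-- ===== Notes on version B (the rewrite author's own statement) =====
-- stated objective: alternative
-- what changed: B never simulates A's while loop: it computes the output length in closed form (per-key-element crossing octave via ceiling division, then min and its first index) and materialises the whole list with one indexed comprehension base + note_key[j % k] + 12*(j // k).
import Mathlib
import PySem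

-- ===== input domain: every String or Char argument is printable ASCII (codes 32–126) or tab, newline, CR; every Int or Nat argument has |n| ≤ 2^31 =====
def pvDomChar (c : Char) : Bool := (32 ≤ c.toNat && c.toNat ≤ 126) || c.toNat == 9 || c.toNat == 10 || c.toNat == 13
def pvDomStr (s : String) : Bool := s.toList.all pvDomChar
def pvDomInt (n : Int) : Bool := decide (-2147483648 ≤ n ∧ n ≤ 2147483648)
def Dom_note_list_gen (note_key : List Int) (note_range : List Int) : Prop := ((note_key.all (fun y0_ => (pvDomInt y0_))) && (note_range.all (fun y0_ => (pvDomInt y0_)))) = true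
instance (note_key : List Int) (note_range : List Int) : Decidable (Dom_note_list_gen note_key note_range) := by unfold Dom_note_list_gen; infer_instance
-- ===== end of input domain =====

-- B drops A's octave-by-octave simulation: it computes the output length in closed form
-- (crossing octave per key element by ceiling division, then min and its first index) and
-- builds the list with one indexed comprehension (objective: alternative algorithm).

-- ===== PORT A =====
-- one pass of A's inner 'for n in note_key: if note_list[-1] < top: note_list.append(base + n)'
def aFold (base top : Int) (acc : List Int) (key : List Int) : List Int :=
  key.foldl (fun l n => if l.getLastD 0 < top then l ++ [base + n] else l) acc

-- A's 'while note_list[-1] < note_range[1]' loop; the fuel argument only makes the loop total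
-- (the caller supplies enough of it for every terminating Python run), the computation is A's.
def aLoop (base top : Int) : Nat → List Int → List Int → List Int
  | 0, _key, acc => acc
  | fuel + 1, key, acc =>
    if acc.getLastD 0 < top then
      let key' := key.map (· + 12)
      aLoop base top fuel key' (aFold base top acc key')
    else acc

def note_list_gen (note_key : List Int) (note_range : List Int) : List Int :=
  match note_range with
  | base :: top :: _ =>
    -- note_list = [note_range[0] + n for n in note_key]
    let init := note_key.map (fun n => base + n)
    if note_key = [] then [] -- Python raises IndexError here (note_list[-1] on []); excluded by Pre_
    else aLoop base top ((top - init.getLastD 0).toNat + 1) note_key init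
  | _ => [] -- Python raises IndexError (note_range[1]); excluded by Pre_

-- ===== PORT B =====
def note_list_gen_alt (note_key : List Int) (note_range : List Int) : List Int :=
  match note_range with
  | [] => [] -- Python raises IndexError (note_range[0]); excluded by Pre_
  | [_] => [] -- Python raises IndexError (note_range[1]); excluded by Pre_
  | base :: top :: _ =>
    if hk : note_key = [] then [] -- Python raises IndexError here (note_key[-1]); excluded by Pre_
    else
      let k : Int := note_key.length
      let m : Int :=
        if top ≤ base + note_key.getLast hk then k
        else
          -- octs = [max(1, -((base + n - top) // 12)) for n in note_key]
          let octs := note_key.map (fun n => max 1 (-(PySem.Int.floordiv (base + n - top) 12)))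
          let o := (PySem.List.min? octs (fun x => x)).getD 0   -- min(octs); octs nonempty
          let i : Int := ((PySem.List.index? octs o).getD 0 : Nat)   -- octs.index(o); o ∈ octs
          k * o + i + 1
      -- [base + note_key[j % k] + 12 * (j // k) for j in range(m)]
      (PySem.List.pyRange 0 m 1).map (fun j =>
        base + PySem.List.pyGetD note_key (PySem.Int.mod j k) 0 + 12 * PySem.Int.floordiv j k)

-- ===== PRECONDITION & SPEC =====
-- Pre_ excludes exactly the inputs on which the Python A raises IndexError:
-- empty note_key (note_list[-1] on an empty list) and note_range shorter than 2 (note_range[1]).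
def Pre_note_list_gen (note_key : List Int) (note_range : List Int) : Prop :=
  note_key ≠ [] ∧ 2 ≤ note_range.length
instance (note_key : List Int) (note_range : List Int) : Decidable (Pre_note_list_gen note_key note_range) := by unfold Pre_note_list_gen; infer_instance

def pvWitness_note_list_gen : List Int × List Int := ([0, 4, 7], [60, 80])

def Spec_note_list_gen (note_key : List Int) (note_range : List Int) (out : List Int) : Prop := out = note_list_gen_alt note_key note_range
instance (note_key : List Int) (note_range : List Int) (out : List Int) : Decidable (Spec_note_list_gen note_key note_range out) := by unfold Spec_note_list_gen; infer_instance

-- ===== CLAIM =====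
def Claim_equal_note_list_gen : Prop := ∀ (note_key : List Int) (note_range : List Int), Dom_note_list_gen note_key note_range → Pre_note_list_gen note_key note_range → Spec_note_list_gen note_key note_range (note_list_gen note_key note_range)

-- ===== LEMMAS AND PROOFS =====

-- the value emitted at flat output position j (key of length k, octave-major order)
def gIdx (base : Int) (key : List Int) (j : Nat) : Int :=
  base + key.getD (j % key.length) 0 + 12 * ((j / key.length : Nat) : Int)

-- the crossing octave of key element n, as B computes it
def octOf (base top n : Int) : Int := max 1 (-(PySem.Int.floordiv (base + n - top) 12))

-- B's ceiling division characterises A's crossing condition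
theorem octOf_le_iff (base top n o : Int) (ho : 1 ≤ o) :
    octOf base top n ≤ o ↔ top ≤ base + n + 12 * o := by
  unfold octOf
  rw [PySem.Int.floordiv_eq_ediv_of_pos (by norm_num)]
  omega

theorem octOf_le_sub (base top n : Int) (h : base + n < top) :
    octOf base top n ≤ top - (base + n) := by
  unfold octOf
  rw [PySem.Int.floordiv_eq_ediv_of_pos (by norm_num)]
  omega

theorem gIdx_at (base : Int) (key : List Int) (o j : Nat) (hj : j < key.length) :
    gIdx base key (key.length * o + j) = base + key[j] + 12 * (o : Int) := by
  unfold gIdx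
  rw [Nat.mul_add_mod key.length o j, Nat.mod_eq_of_lt hj,
      Nat.mul_add_div (by omega), Nat.div_eq_of_lt hj, Nat.add_zero,
      List.getD_eq_getElem key 0 hj]

-- splitting the range of flat positions at an octave boundary
theorem seg_eq (base : Int) (key : List Int) (o t : Nat) (ht : t ≤ key.length) :
    (List.range (key.length * o + t)).map (gIdx base key)
      = (List.range (key.length * o)).map (gIdx base key)
        ++ (key.take t).map (fun n => base + n + 12 * (o : Int)) := by
  rw [List.range_add, List.map_append, List.map_map]
  congr 1
  apply List.ext_getElem
  · simp [Nat.min_eq_left ht]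
  · intro j h1 h2
    simp only [List.getElem_map, List.getElem_range, Function.comp]
    rw [List.getElem_take]
    exact gIdx_at base key o j (by simp at h1; omega)

theorem getLastD_range_map (g : Nat → Int) (N : Nat) (hN : 0 < N) :
    (((List.range N).map g).getLastD 0) = g (N - 1) := by
  have : N = (N - 1) + 1 := by omega
  rw [this, List.range_succ, List.map_append]
  simp

-- once the last appended value has reached the bound, A's guarded fold appends nothing more
theorem aFold_ge (base top : Int) (acc l : List Int) (h : ¬ acc.getLastD 0 < top) :
    aFold base top acc l = acc := by
  induction l with
  | nil => rfl
  | cons n ns ih => simp only [aFold, List.foldl_cons, if_neg h]; exact ih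

-- likewise A's fueled while-loop is the identity once the guard fails
theorem aLoop_ge (base top : Int) (fuel : Nat) (key acc : List Int)
    (h : ¬ acc.getLastD 0 < top) : aLoop base top fuel key acc = acc := by
  cases fuel with
  | zero => rfl
  | succ f => simp only [aLoop]; rw [if_neg h]

-- when every appended value stays below the bound, the guarded fold appends all of them
theorem aFold_all (base top : Int) (key' : List Int) :
    ∀ acc : List Int, acc.getLastD 0 < top → (∀ n ∈ key', base + n < top) →
    aFold base top acc key' = acc ++ key'.map (fun n => base + n) := by
  induction key' with
  | nil => intro acc _ _; simp [aFold]
  | cons n ns ih =>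
    intro acc hacc hall
    simp only [aFold, List.foldl_cons, if_pos hacc, List.map_cons]
    have h1 : (acc ++ [base + n]).getLastD 0 < top := by
      rw [List.getLastD_concat]; exact hall n (List.mem_cons_self)
    have := ih (acc ++ [base + n]) h1 (fun x hx => hall x (List.mem_cons_of_mem n hx))
    simp only [aFold] at this
    rw [this, List.append_assoc]; rfl

-- when the values below the bound are followed by one reaching it, the fold stops right after it
theorem aFold_cross (base top w : Int) (ws : List Int) (hw : top ≤ base + w) :
    ∀ (us : List Int) (acc : List Int), acc.getLastD 0 < top → (∀ n ∈ us, base + n < top) →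
    aFold base top acc (us ++ w :: ws) = acc ++ us.map (fun n => base + n) ++ [base + w] := by
  intro us
  induction us with
  | nil =>
    intro acc hacc _
    simp only [List.nil_append, aFold, List.foldl_cons, if_pos hacc, List.map_nil]
    have hge : ¬ (acc ++ [base + w]).getLastD 0 < top := by
      rw [List.getLastD_concat]; omega
    have := aFold_ge base top (acc ++ [base + w]) ws hge
    simp only [aFold] at this
    rw [this]; simp
  | cons u us' ih =>
    intro acc hacc hall
    simp only [List.cons_append, aFold, List.foldl_cons, if_pos hacc, List.map_cons]
    have h1 : (acc ++ [base + u]).getLastD 0 < top := by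
      rw [List.getLastD_concat]; exact hall u (List.mem_cons_self)
    have := ih (acc ++ [base + u]) h1 (fun x hx => hall x (List.mem_cons_of_mem u hx))
    simp only [aFold] at this
    rw [this, List.append_assoc, List.append_assoc]
    simp

-- the octave-o values are the shifted-key values A appends at that stage
theorem shift_map (key : List Int) (o : Nat) :
    (key.map (fun n => n + 12 * ((o : Int) - 1))).map (· + 12)
      = key.map (fun n => n + 12 * (o : Int)) := by
  rw [List.map_map]
  apply List.map_congr_left
  intro a _
  simp [Function.comp]; ring

-- main loop invariant: entering octave o (1 ≤ o ≤ O) with the first k*o values emitted,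
-- A's while-loop produces exactly the first k*O + I + 1 values, where O is the first
-- crossing octave and I the first crossing index inside it
theorem loop_closed (base top : Int) (key : List Int) (O I : Nat)
    (hkey : key ≠ [])
    (hOI : I < key.length)
    (hcrossI : top ≤ base + key[I] + 12 * (O : Int))
    (hbeforeI : ∀ j (hj : j < key.length), j < I → base + key[j] + 12 * (O : Int) < top)
    (hbeforeO : ∀ o : Nat, 1 ≤ o → o < O → ∀ j (hj : j < key.length), base + key[j] + 12 * (o : Int) < top)
    (hO : 1 ≤ O) :
    ∀ (fuel o : Nat), 1 ≤ o → o ≤ O → O - o < fuel →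
    ((List.range (key.length * o)).map (gIdx base key)).getLastD 0 < top →
    aLoop base top fuel (key.map (fun n => n + 12 * ((o : Int) - 1)))
        ((List.range (key.length * o)).map (gIdx base key))
      = (List.range (key.length * O + I + 1)).map (gIdx base key) := by
  intro fuel
  induction fuel with
  | zero => intro o _ _ h _; omega
  | succ f ih =>
    intro o ho hoO hfuel hlast
    simp only [aLoop, if_pos hlast]
    rw [shift_map key o]
    by_cases hcase : o = O
    · -- crossing octave: the fold stops right after position I
      subst hcase
      have hsplit : key = key.take I ++ key[I] :: key.drop (I + 1) := by
        rw [← List.drop_eq_getElem_cons hOI, List.take_append_drop]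
      have hkeymap : key.map (fun n => n + 12 * (o : Int))
          = (key.take I).map (fun n => n + 12 * (o : Int))
            ++ (key[I] + 12 * (o : Int)) :: (key.drop (I + 1)).map (fun n => n + 12 * (o : Int)) := by
        conv_lhs => rw [hsplit]
        rw [List.map_append, List.map_cons]
      have hus : ∀ n ∈ (key.take I).map (fun n => n + 12 * (o : Int)), base + n < top := by
        intro n hn
        rw [List.mem_map] at hn
        obtain ⟨x, hx, rfl⟩ := hn
        rw [List.mem_take_iff_getElem] at hx
        obtain ⟨j, hj, rfl⟩ := hx
        have hj' : j < I := by omega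
        have := hbeforeI j (by omega) hj'
        omega
      have hmid : ((key.take I).map (fun n => n + 12 * (o : Int))).map (fun n => base + n)
          = (key.take I).map (fun n => base + n + 12 * (o : Int)) := by
        rw [List.map_map]
        apply List.map_congr_left
        intro a _
        simp [Function.comp]; ring
      have hfold : aFold base top ((List.range (key.length * o)).map (gIdx base key))
            (key.map (fun n => n + 12 * (o : Int)))
          = (List.range (key.length * o)).map (gIdx base key)
            ++ (key.take I).map (fun n => base + n + 12 * (o : Int))
            ++ [base + (key[I] + 12 * (o : Int))] := by
        rw [hkeymap,
          aFold_cross base top (key[I] + 12 * (o : Int))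
            ((key.drop (I + 1)).map (fun n => n + 12 * (o : Int))) (by omega)
            ((key.take I).map (fun n => n + 12 * (o : Int)))
            ((List.range (key.length * o)).map (gIdx base key)) hlast hus,
          hmid]
      rw [hfold]
      have htake : (List.range (key.length * o + (I + 1))).map (gIdx base key)
          = (List.range (key.length * o)).map (gIdx base key)
            ++ (key.take (I + 1)).map (fun n => base + n + 12 * (o : Int)) := by
        exact seg_eq base key o (I + 1) (by omega)
      have htake1 : key.take (I + 1) = key.take I ++ [key[I]] := by
        rw [List.take_add_one]
        congr
        simp [List.getElem?_eq_getElem hOI]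
      have hres : (List.range (key.length * o + I + 1)).map (gIdx base key)
          = (List.range (key.length * o)).map (gIdx base key)
            ++ (key.take I).map (fun n => base + n + 12 * (o : Int))
            ++ [base + (key[I] + 12 * (o : Int))] := by
        have : key.length * o + I + 1 = key.length * o + (I + 1) := by omega
        rw [this, htake, htake1, List.map_append, ← List.append_assoc]
        simp only [List.map_cons, List.map_nil]
        congr 2
        ring_nf
      rw [hres]
      apply aLoop_ge
      rw [List.getLastD_concat]
      omega
    · -- below the crossing octave: the fold emits the whole octave, recurse
      have hoO' : o < O := by omega
      have hall : ∀ n ∈ key.map (fun n => n + 12 * (o : Int)), base + n < top := by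
        intro n hn
        rw [List.mem_map] at hn
        obtain ⟨x, hx, rfl⟩ := hn
        obtain ⟨j, hj, rfl⟩ := List.mem_iff_getElem.mp hx
        have := hbeforeO o ho hoO' j hj
        omega
      rw [aFold_all base top _ _ hlast hall]
      have hseg : (List.range (key.length * o)).map (gIdx base key)
            ++ (key.map (fun n => n + 12 * (o : Int))).map (fun n => base + n)
          = (List.range (key.length * (o + 1))).map (gIdx base key) := by
        have := seg_eq base key o key.length (le_refl _)
        rw [Nat.mul_add_one] at *
        rw [this, List.take_length, List.map_map]
        congr 1
        apply List.map_congr_left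
        intro a _
        simp [Function.comp]; ring
      rw [hseg]
      have hlast' : ((List.range (key.length * (o + 1))).map (gIdx base key)).getLastD 0 < top := by
        have hk : 0 < key.length := List.length_pos_iff.mpr hkey
        rw [getLastD_range_map _ _ (Nat.mul_pos hk (by omega))]
        have h1 : key.length * (o + 1) - 1 = key.length * o + (key.length - 1) := by
          rw [Nat.mul_succ]; omega
        rw [h1, gIdx_at base key o (key.length - 1) (by omega)]
        exact hbeforeO o ho hoO' (key.length - 1) (by omega)
      have := ih (o + 1) (by omega) (by omega) (by omega) hlast'
      have hk2 : key.map (fun n => n + 12 * (((o + 1 : Nat) : Int) - 1))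
          = key.map (fun n => n + 12 * (o : Int)) := by
        apply List.map_congr_left
        intro a _
        push_cast; ring
      rw [hk2] at this
      exact this

-- B's output written over Nat indices
theorem alt_range (base : Int) (key : List Int) (m : Int) :
    (PySem.List.pyRange 0 m 1).map (fun j =>
        base + PySem.List.pyGetD key (PySem.Int.mod j (key.length : Int)) 0
          + 12 * PySem.Int.floordiv j (key.length : Int))
      = (List.range m.toNat).map (gIdx base key) := by
  rw [PySem.List.pyRange_one, List.map_map]
  simp only [Int.sub_zero]
  apply List.map_congr_left
  intro t _
  simp only [Function.comp, zero_add]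
  unfold gIdx
  rw [PySem.Int.mod_natCast, PySem.Int.floordiv_natCast, PySem.List.pyGetD_natCast]

theorem main_eq : ∀ (note_key note_range : List Int), note_key ≠ [] → 2 ≤ note_range.length →
    note_list_gen note_key note_range = note_list_gen_alt note_key note_range := by
  intro key range hk hlen
  rcases range with _ | ⟨base, _ | ⟨top, rest⟩⟩
  · simp at hlen
  · simp at hlen
  · simp only [note_list_gen, note_list_gen_alt]
    rw [if_neg hk, dif_neg hk]
    have hkpos : 0 < key.length := List.length_pos_iff.mpr hk
    have hinit : key.map (fun n => base + n) = (List.range key.length).map (gIdx base key) := by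
      have := seg_eq base key 0 key.length (le_refl _)
      simp only [Nat.mul_zero, List.range_zero, List.map_nil, List.nil_append,
        Nat.zero_add, List.take_length, Nat.cast_zero] at this
      rw [this]
      apply List.map_congr_left
      intro a _; ring
    have hlast0 : (key.map (fun n => base + n)).getLastD 0 = base + key.getLast hk := by
      rw [List.getLastD_eq_getLast?, List.getLast?_map, List.getLast?_eq_some_getLast hk]
      rfl
    by_cases hstop : top ≤ base + key.getLast hk
    · -- octave 0 already reaches the bound: A's while-guard fails at once, B's m = k
      rw [if_pos hstop]
      rw [aLoop_ge base top _ _ _ (by rw [hlast0]; omega)]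
      rw [alt_range base key (key.length : Int), Int.toNat_natCast, hinit]
    · rw [if_neg hstop]
      -- the minimum crossing octave mn and its first index I in octs
      set octs := key.map (fun n => max 1 (-(PySem.Int.floordiv (base + n - top) 12))) with hocts
      have hoctsne : octs ≠ [] := by simpa [hocts] using hk
      obtain ⟨mn, hmn⟩ := Option.isSome_iff_exists.mp
        (by rw [Option.isSome_iff_ne_none, Ne, PySem.List.min?_eq_none_iff]; exact hoctsne :
          (PySem.List.min? octs (fun x => x)).isSome)
      have hmn_mem : mn ∈ octs := PySem.List.min?_mem hmn
      have hmn_min : ∀ y ∈ octs, mn ≤ y := PySem.List.min?_isMin hmn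
      have hIs : (PySem.List.index? octs mn).isSome := by
        rw [PySem.List.index?_isSome_iff]; exact hmn_mem
      obtain ⟨I, hI⟩ := Option.isSome_iff_exists.mp hIs
      obtain ⟨hIlt, hIeq, hIfirst⟩ := PySem.List.getElem_of_index?_eq_some hI
      rw [hmn]
      simp only [Option.getD_some]
      rw [hI]
      simp only [Option.getD_some]
      have hoctslen : octs.length = key.length := by simp [hocts]
      have hIlt' : I < key.length := by omega
      -- every element of octs is octOf of the matching key element, and ≥ 1
      have hocts_at : ∀ j (hj : j < key.length), octs[j]'(by omega) = octOf base top key[j] := by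
        intro j hj; simp [hocts, octOf]
      have hmn1 : 1 ≤ mn := by
        obtain ⟨j, hj, rfl⟩ := List.mem_iff_getElem.mp hmn_mem
        rw [hocts_at j (by omega)]; unfold octOf; omega
      set O := mn.toNat with hO
      have hmnO : (O : Int) = mn := Int.toNat_of_nonneg (by omega)
      have hm : (key.length : Int) * mn + (I : Int) + 1 = ((key.length * O + I + 1 : Nat) : Int) := by
        push_cast [hmnO]; ring
      rw [hm, alt_range base key _, Int.toNat_natCast]
      -- A's fuel is enough: the crossing octave of the last key element bounds mn
      have hlastmem : key.getLast hk ∈ key := List.getLast_mem hk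
      have hfuel : mn ≤ top - (base + key.getLast hk) := by
        obtain ⟨j, hj, hje⟩ := List.mem_iff_getElem.mp hlastmem
        have h1 : mn ≤ octOf base top (key.getLast hk) := by
          have := hmn_min (octs[j]'(by omega)) (List.getElem_mem _)
          rw [hocts_at j hj, hje] at this; exact this
        have h2 := octOf_le_sub base top (key.getLast hk) (by omega)
        omega
      -- the crossing facts loop_closed needs, decoded through octOf_le_iff
      have hcrossI : top ≤ base + key[I]'hIlt' + 12 * (O : Int) := by
        rw [← octOf_le_iff base top _ _ (by omega), hmnO, ← hocts_at I hIlt', hIeq]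
      have hbeforeI : ∀ j (hj : j < key.length), j < I → base + key[j] + 12 * (O : Int) < top := by
        intro j hj hjI
        have hne := hIfirst j (by omega)
        have hge := hmn_min (octs[j]'(by omega)) (List.getElem_mem _)
        rw [hocts_at j hj] at hne hge
        have : ¬ octOf base top key[j] ≤ (O : Int) := by rw [hmnO]; omega
        rw [octOf_le_iff base top _ _ (by omega)] at this
        omega
      have hbeforeO : ∀ o : Nat, 1 ≤ o → o < O → ∀ j (hj : j < key.length),
          base + key[j] + 12 * (o : Int) < top := by
        intro o ho hoO j hj
        have hge := hmn_min (octs[j]'(by omega)) (List.getElem_mem _)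
        rw [hocts_at j hj] at hge
        have : ¬ octOf base top key[j] ≤ (o : Int) := by omega
        rw [octOf_le_iff base top _ _ (by exact_mod_cast ho)] at this
        omega
      have hO1 : 1 ≤ O := by omega
      have hkey1 : key = key.map (fun n => n + 12 * (((1 : Nat) : Int) - 1)) := by
        conv_lhs => rw [← List.map_id key]
        apply List.map_congr_left
        intro a _; simp
      have hlast1 : ((List.range (key.length * 1)).map (gIdx base key)).getLastD 0 < top := by
        rw [Nat.mul_one, ← hinit, hlast0]; omega
      have hF : O - 1 < (top - (key.map (fun n => base + n)).getLastD 0).toNat + 1 := by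
        rw [hlast0]; omega
      have := loop_closed base top key O I hk hIlt' hcrossI hbeforeI hbeforeO hO1
        ((top - (key.map (fun n => base + n)).getLastD 0).toNat + 1) 1 (le_refl 1) hO1 hF hlast1
      rw [← hkey1, Nat.mul_one, ← hinit] at this
      rw [this]

-- ===== VERDICT =====
theorem note_list_gen_spec : Claim_equal_note_list_gen := by
  intro note_key note_range _hdom hpre
  unfold Spec_note_list_gen
  exact main_eq note_key note_range hpre.1 hpre.2
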